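-- pv_equiv track=rewrite | github.com/kevin-novanta/backend_for_ai_agency | workflows/outreach_sender/Utils/opener_scheduler.py | batch_leads
-- ===== SOURCE A (Python) =====
-- def batch_leads(leads, inbox_count, per_inbox_limit, daily_limit):
--     leads_to_send = leads[:daily_limit]
--     batches = [[] for _ in range(inbox_count)]
--
--     for i, lead in enumerate(leads_to_send):
--         inbox_index = i % inbox_count
--         if len(batches[inbox_index]) < per_inbox_limit:
--             batches[inbox_index].append(lead)
--
--     return batches
-- ===== SOURCE B (Python) =====
-- def batch_leads(leads, inbox_count, per_inbox_limit, daily_limit):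
--     pool = leads[:daily_limit]
--     cap = max(per_inbox_limit, 0)
--     return [[pool[k] for k in range(j, len(pool), inbox_count)][:cap]
--             for j in range(inbox_count)]
-- ===== Notes on version B (the rewrite author's own statement) =====
-- stated objective: simpler
-- what changed: A interleaves one modulo-dispatch pass that mutates a list of batch lists with a per-append capacity test; B builds each inbox's batch directly as the strided index subsequence range(j, len(pool), inbox_count) truncated to the per-inbox cap, with no mutable batch state.
import Mathlib
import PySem

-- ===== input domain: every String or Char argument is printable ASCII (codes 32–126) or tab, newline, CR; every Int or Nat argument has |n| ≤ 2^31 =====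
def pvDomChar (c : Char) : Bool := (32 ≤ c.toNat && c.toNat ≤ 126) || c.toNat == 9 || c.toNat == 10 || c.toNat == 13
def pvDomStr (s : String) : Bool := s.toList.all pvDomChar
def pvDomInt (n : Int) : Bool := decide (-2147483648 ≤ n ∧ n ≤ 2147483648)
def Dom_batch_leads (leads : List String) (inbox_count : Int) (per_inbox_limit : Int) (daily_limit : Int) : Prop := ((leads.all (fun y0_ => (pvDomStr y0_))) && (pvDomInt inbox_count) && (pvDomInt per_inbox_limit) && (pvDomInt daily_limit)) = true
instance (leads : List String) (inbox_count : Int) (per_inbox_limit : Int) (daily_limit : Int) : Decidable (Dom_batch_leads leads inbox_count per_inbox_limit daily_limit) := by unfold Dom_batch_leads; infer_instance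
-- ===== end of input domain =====

-- B replaces A's single interleaved modulo-dispatch loop by one strided index pass per
-- inbox (simpler: each batch is produced directly, no mutable batch array).

-- ===== PORT A =====
def batch_leads (leads : List String) (inbox_count : Int) (per_inbox_limit : Int) (daily_limit : Int) : List (List String) :=
  let leads_to_send := PySem.List.slice leads none (some daily_limit)
  let batches : List (List String) := (PySem.List.pyRange 0 inbox_count 1).map (fun _ => [])
  (PySem.List.enumerate leads_to_send).foldl
    (fun bs q =>
      let inbox_index := PySem.Int.mod q.1 inbox_count
      -- batches[inbox_index]: in range under Pre_ (defaults below are never read there)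
      let b := PySem.List.pyGetD bs inbox_index []
      if (b.length : Int) < per_inbox_limit then PySem.List.pySetD bs inbox_index (b ++ [q.2]) else bs)
    batches

-- ===== PORT B =====
def batch_leads_alt (leads : List String) (inbox_count : Int) (per_inbox_limit : Int) (daily_limit : Int) : List (List String) :=
  let pool := PySem.List.slice leads none (some daily_limit)
  let cap := max per_inbox_limit 0
  (PySem.List.pyRange 0 inbox_count 1).map (fun j =>
    -- pool[k] for k in range(j, len(pool), inbox_count): k is always in range, default unread
    PySem.List.slice ((PySem.List.pyRange j (pool.length : Int) inbox_count).map
      (fun k => PySem.List.pyGetD pool k "")) none (some cap))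

-- ===== PRECONDITION & SPEC =====
-- Pre_ excludes exactly the inputs where A raises: inbox_count ≤ 0 while leads[:daily_limit]
-- is non-empty (ZeroDivisionError for inbox_count = 0, IndexError for negative inbox_count).
def Pre_batch_leads (leads : List String) (inbox_count : Int) (per_inbox_limit : Int) (daily_limit : Int) : Prop :=
  0 < inbox_count ∨ leads = [] ∨ daily_limit = 0 ∨ (daily_limit < 0 ∧ daily_limit + leads.length ≤ 0)
instance (leads : List String) (inbox_count : Int) (per_inbox_limit : Int) (daily_limit : Int) : Decidable (Pre_batch_leads leads inbox_count per_inbox_limit daily_limit) := by unfold Pre_batch_leads; infer_instance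
def pvWitness_batch_leads : List String × Int × Int × Int := (["a", "b", "c"], 2, 1, 5)

def Spec_batch_leads (leads : List String) (inbox_count : Int) (per_inbox_limit : Int) (daily_limit : Int) (out : List (List String)) : Prop := out = batch_leads_alt leads inbox_count per_inbox_limit daily_limit
instance (leads : List String) (inbox_count : Int) (per_inbox_limit : Int) (daily_limit : Int) (out : List (List String)) : Decidable (Spec_batch_leads leads inbox_count per_inbox_limit daily_limit out) := by unfold Spec_batch_leads; infer_instance

-- ===== CLAIM (what is proved, stated in full; the proofs are below) =====
def Claim_equal_batch_leads : Prop := ∀ (leads : List String) (inbox_count : Int) (per_inbox_limit : Int) (daily_limit : Int), Dom_batch_leads leads inbox_count per_inbox_limit daily_limit → Pre_batch_leads leads inbox_count per_inbox_limit daily_limit → Spec_batch_leads leads inbox_count per_inbox_limit daily_limit (batch_leads leads inbox_count per_inbox_limit daily_limit)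
-- ===== LEMMAS AND PROOFS =====

theorem pyRange_pos_nil (a b s : Int) (hs : 0 < s) (h : b ≤ a) : PySem.List.pyRange a b s = [] := by
  rw [PySem.List.pyRange_of_pos a b hs]
  simp [show ¬ a < b by omega]

theorem pyRange_pos_cons (a b s : Int) (hs : 0 < s) (h : a < b) :
    PySem.List.pyRange a b s = a :: PySem.List.pyRange (a + s) b s := by
  rw [PySem.List.pyRange_of_pos a b hs, PySem.List.pyRange_of_pos (a+s) b hs]
  have hd : ((b - a + s - 1) / s).toNat = (if a + s < b then ((b - (a+s) + s - 1) / s).toNat else 0) + 1 := by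
    by_cases hb : a + s < b
    · simp only [hb, if_pos]
      have e1 : b - a + s - 1 = (b - (a+s) + s - 1) + 1 * s := by ring
      rw [e1, Int.add_mul_ediv_right _ _ (by omega : s ≠ 0)]
      have h2 : 0 ≤ (b - (a + s) + s - 1) / s := Int.ediv_nonneg (by omega) (by omega)
      omega
    · simp only [hb, reduceIte]
      have e1 : (b - a + s - 1) / s = 1 := by
        rw [Int.ediv_eq_iff_of_pos (by omega)]; omega
      omega
  rw [hd, if_pos h, List.range_succ_eq_map]
  simp only [List.map_cons, List.map_map, Nat.cast_zero, mul_zero, add_zero, List.cons.injEq, true_and]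
  apply List.map_congr_left
  intro k hk
  simp only [Function.comp_apply]
  push_cast
  ring

def takeEvery {α : Type} (n : Nat) : List α → List α
  | [] => []
  | x :: xs => x :: takeEvery n (xs.drop (n - 1))
termination_by l => l.length
decreasing_by simp

theorem mapRange_eq_takeEvery (pool : List String) (n : Nat) (hn : 0 < n) : ∀ (j : Nat),
    (PySem.List.pyRange (j : Int) (pool.length : Int) (n : Int)).map
      (fun k => PySem.List.pyGetD pool k "") = takeEvery n (pool.drop j) := by
  have H : ∀ (m j : Nat), pool.length - j ≤ m →
      (PySem.List.pyRange (j : Int) (pool.length : Int) (n : Int)).map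
        (fun k => PySem.List.pyGetD pool k "") = takeEvery n (pool.drop j) := by
    intro m
    induction m with
    | zero =>
      intro j hj
      rw [pyRange_pos_nil _ _ _ (by omega) (by omega), List.drop_eq_nil_of_le (by omega)]
      simp [takeEvery]
    | succ m ih =>
      intro j hj
      by_cases hlt : j < pool.length
      · have hm : pool.length - (j + n) ≤ m := by omega
        rw [pyRange_pos_cons _ _ _ (by omega) (by exact_mod_cast hlt)]
        rw [List.drop_eq_getElem_cons hlt]
        rw [takeEvery]
        simp only [List.map_cons, List.cons.injEq]
        constructor
        · rw [PySem.List.pyGetD_natCast]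
          exact List.getD_eq_getElem pool _ hlt
        · have e : (j : Int) + (n : Int) = ((j + n : Nat) : Int) := by push_cast; ring
          rw [e, ih (j + n) hm]
          rw [List.drop_drop, show j + 1 + (n - 1) = j + n from by omega]
      · rw [pyRange_pos_nil _ _ _ (by omega) (by omega), List.drop_eq_nil_of_le (by omega)]
        simp [takeEvery]
  intro j; exact H pool.length j (by omega)

-- bucket offset: distance from residue a to bucket t, mod n, without %
def off (n a t : Nat) : Nat := if a ≤ t then t - a else t + n - a

def stepN (cap : Nat) (bs : List (List String)) (a : Nat) (x : String) : List (List String) :=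
  let b := bs.getD a []
  if b.length < cap then bs.set a (b ++ [x]) else bs

def foldN (cap n : Nat) : Nat → List (List String) → List String → List (List String)
  | _, bs, [] => bs
  | a, bs, x :: xs => foldN cap n (if a + 1 = n then 0 else a + 1) (stepN cap bs a x) xs

theorem succ_mod (s n : Nat) (hn : 0 < n) : (s + 1) % n = if s % n + 1 = n then 0 else s % n + 1 := by
  have h1 : s % n < n := Nat.mod_lt _ hn
  rw [← Nat.mod_add_mod]
  by_cases h : s % n + 1 = n
  · rw [h, Nat.mod_self]; simp
  · rw [Nat.mod_eq_of_lt (by omega), if_neg h]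

theorem length_stepN (cap : Nat) (bs : List (List String)) (a : Nat) (x : String) :
    (stepN cap bs a x).length = bs.length := by
  unfold stepN
  dsimp only
  split <;> simp

theorem length_foldN (cap n : Nat) (l : List String) : ∀ (a : Nat) (bs : List (List String)),
    (foldN cap n a bs l).length = bs.length := by
  induction l with
  | nil => intro a bs; rfl
  | cons x xs ih => intro a bs; rw [foldN, ih, length_stepN]

theorem foldN_getD (cap n : Nat) (hn : 0 < n) (l : List String) :
    ∀ (a : Nat), a < n → ∀ (bs : List (List String)), bs.length = n → ∀ t, t < n →
    (foldN cap n a bs l).getD t [] =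
      bs.getD t [] ++ (takeEvery n (l.drop (off n a t))).take (cap - (bs.getD t []).length) := by
  induction l with
  | nil =>
    intro a ha bs hbs t ht
    simp [foldN, takeEvery]
  | cons x xs ih =>
    intro a ha bs hbs t ht
    rw [foldN]
    have ha' : (if a + 1 = n then 0 else a + 1) < n := by split <;> omega
    rw [ih _ ha' _ (by rw [length_stepN]; exact hbs) t ht]
    by_cases hat : a = t
    · subst hat
      have hoff : off n a a = 0 := by unfold off; split <;> omega
      have hoff' : off n (if a + 1 = n then 0 else a + 1) a = n - 1 := by
        unfold off; split <;> split <;> omega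
      rw [hoff, hoff', List.drop_zero, takeEvery]
      unfold stepN
      dsimp only
      by_cases hlen : (bs.getD a []).length < cap
      · rw [if_pos hlen]
        rw [show (bs.set a (bs.getD a [] ++ [x])).getD a [] = bs.getD a [] ++ [x] from by
          simp [List.getD, show a < bs.length from by omega]]
        have hlen1 : (bs.getD a [] ++ [x]).length = (bs.getD a []).length + 1 := by
          rw [List.length_append, List.length_cons, List.length_nil]
        have : cap - (bs.getD a []).length = (cap - (bs.getD a [] ++ [x]).length) + 1 := by
          rw [hlen1]; omega
        rw [this, List.take_succ_cons, List.append_assoc, List.singleton_append]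
      · rw [if_neg hlen]
        have h0 : cap - (bs.getD a []).length = 0 := by omega
        rw [h0]
        simp
    · have h1 : 1 ≤ off n a t := by unfold off; split <;> omega
      have h2 : off n (if a + 1 = n then 0 else a + 1) t = off n a t - 1 := by
        unfold off; split <;> split <;> split <;> omega
      have hstep : (stepN cap bs a x).getD t [] = bs.getD t [] := by
        unfold stepN
        dsimp only
        split
        · simp [List.getD, List.getElem?_set_ne hat]
        · rfl
      obtain ⟨k, hk⟩ : ∃ k, off n a t = k + 1 := ⟨off n a t - 1, by omega⟩
      rw [hstep, h2, hk, List.drop_succ_cons]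
      simp

theorem foldA_eq (n : Nat) (hn : 0 < n) (p : Int) (l : List String) : ∀ (s : Nat) (bs : List (List String)),
    (PySem.List.enumerate l (s : Int)).foldl
      (fun bs q =>
        let inbox_index := PySem.Int.mod q.1 (n : Int)
        let b := PySem.List.pyGetD bs inbox_index []
        if (b.length : Int) < p then PySem.List.pySetD bs inbox_index (b ++ [q.2]) else bs) bs
    = foldN p.toNat n (s % n) bs l := by
  induction l with
  | nil => intro s bs; rfl
  | cons x xs ih =>
    intro s bs
    rw [PySem.List.enumerate_cons, List.foldl_cons]
    have hstep : (let inbox_index := PySem.Int.mod ((s : Int), x).1 (n : Int)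
        let b := PySem.List.pyGetD bs inbox_index []
        if (b.length : Int) < p then PySem.List.pySetD bs inbox_index (b ++ [((s : Int), x).2]) else bs)
        = stepN p.toNat bs (s % n) x := by
      simp only [PySem.Int.mod_natCast, PySem.List.pyGetD_natCast, PySem.List.pySetD_natCast]
      unfold stepN
      dsimp only
      by_cases h : (bs.getD (s % n) []).length < p.toNat
      · rw [if_pos (by omega), if_pos h]
      · rw [if_neg (by omega), if_neg h]
    rw [hstep]
    have hc : (s : Int) + 1 = ((s + 1 : Nat) : Int) := by push_cast; ring
    rw [hc, ih (s + 1) _, succ_mod s n hn, foldN]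

theorem pool_nil (leads : List String) (inbox_count per_inbox_limit daily_limit : Int)
    (hpre : Pre_batch_leads leads inbox_count per_inbox_limit daily_limit)
    (hic : inbox_count ≤ 0) : PySem.List.slice leads none (some daily_limit) = [] := by
  rcases hpre with h | rfl | rfl | ⟨h1, h2⟩
  · omega
  · apply List.eq_nil_iff_forall_not_mem.mpr
    intro y hy
    exact absurd (PySem.List.mem_of_mem_slice _ _ _ hy) (List.not_mem_nil)
  · rw [PySem.List.slice_to leads (le_refl 0)]
    simp
  · have hk : daily_limit = -(((-daily_limit).toNat : Nat) : Int) := by omega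
    rw [hk, PySem.List.slice_to_neg_natCast leads _ (by omega)]
    rw [show leads.length - (-daily_limit).toNat = 0 from by omega, List.take_zero]

-- ===== VERDICT (by name: the statement is the Claim_ definition above) =====
theorem batch_leads_spec : Claim_equal_batch_leads := by
  intro leads ic p d hdom hpre
  unfold Spec_batch_leads batch_leads batch_leads_alt
  simp only []
  by_cases hic : 0 < ic
  · obtain ⟨n, rfl, hn⟩ : ∃ n : Nat, ic = (n : Int) ∧ 0 < n := ⟨ic.toNat, by omega, by omega⟩
    rw [PySem.List.pyRange_zero_natCast n, List.map_const']
    rw [show PySem.List.enumerate (PySem.List.slice leads none (some d)) =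
        PySem.List.enumerate (PySem.List.slice leads none (some d)) (((0 : Nat) : Int)) from rfl]
    rw [foldA_eq n hn p _ 0, Nat.zero_mod]
    apply List.ext_getElem
    · rw [length_foldN, List.length_replicate, List.length_map, List.length_map, List.length_range]
      simp
    · intro i h1 h2
      have hi : i < n := by
        rw [length_foldN, List.length_replicate] at h1
        simpa using h1
      rw [← List.getD_eq_getElem _ ([] : List String) h1]
      rw [foldN_getD p.toNat n hn _ 0 hn _ (by simp) i hi]
      rw [List.getD_replicate _ (by simpa using hi)]
      rw [show off n 0 i = i from by unfold off; simp]
      simp only [List.getElem_map, List.getElem_range]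
      rw [mapRange_eq_takeEvery _ n hn i]
      rw [PySem.List.slice_to _ (le_max_right p 0)]
      rw [show (max p 0).toNat = p.toNat from by omega]
      simp
  · have hL : PySem.List.slice leads none (some d) = [] := pool_nil leads _ p d hpre (by omega)
    rw [hL]
    rw [pyRange_pos_nil 0 ic 1 one_pos (by omega)]
    simp [PySem.List.enumerate]
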